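-- pv_equiv track=rewrite | github.com/honzikhk/advent_of_code_2022 | day_7/7.1_day.py | make_system
-- ===== SOURCE A (Python) =====
-- def make_system(formated_data):
--     """ Create dictionary of name of dir as a key and list of content as value """
--     fucking_dictionary = {}
--     for command in range(0, len(formated_data)):
--         _ = []
--         expression = formated_data[command]
--         if expression[2:4] == "ls":
--             for command_2 in range(command + 1, len(formated_data)):
--                 if formated_data[command_2][0] == "$":
--                     break
--                 else:
--                     _.append(formated_data[command_2])
--
--             fucking_dictionary[formated_data[command - 1][5:]] = _
--     # fucking_dictionary[formated_data[command - 1][5:]] = _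
--
--     return fucking_dictionary
-- ===== SOURCE B (Python) =====
-- def make_system(formated_data):
--     """ Create dictionary of name of dir as a key and list of content as value """
--     # Single right-to-left pass: maintain the block of lines up to the next
--     # "$"-line (kept in reverse order so appends are O(1)); an "ls" line's
--     # content is exactly the current block, and its key comes from the line
--     # processed one step later (the line above it).
--     entries = []        # (key, content) pairs, collected in descending line order
--     pending = None      # content of an "ls" found at the position just below
--     rev_block = []      # lines from the current position down to the next "$"-line, reversed
--     for line in reversed(formated_data):
--         if pending is not None:
--             entries.append((line[5:], pending))
--         pending = rev_block[::-1] if line[2:4] == "ls" else None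
--         if line.startswith("$"):
--             rev_block = []
--         else:
--             rev_block.append(line)
--     system = {}
--     if pending is not None:
--         # the "ls" is on the very first line: there is no previous "cd" line
--         system[""] = pending
--     for key, content in reversed(entries):
--         system[key] = content
--     return system
-- ===== Notes on version B (the rewrite author's own statement) =====
-- stated objective: alternative
-- what changed: A re-scans forward from every 'ls' line until the next '$' line (nested index loops); B makes a single right-to-left pass that incrementally maintains the current content block and attaches each listing's key from the line above, then builds the dict once.
-- intended difference: When the first line is itself an 'ls' command (and the last line is longer than 5 chars), A keys that listing by formated_data[-1][5:] via negative-index wraparound to the LAST line; B uses the empty directory name, the intended value since no previous 'cd' line exists. — e.g. on make_system(["$ ls", "abcdefgh"]): A returns [("fgh", ["abcdefgh"])], B returns [("", ["abcdefgh"])]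
-- crash fix: On inputs containing an empty line reached by an 'ls' scan (no '$'-line in between), A raises IndexError on line[0]; B returns the dictionary with the empty line collected as ordinary content. — e.g. on make_system(["$ ls", ""]): A raises IndexError, B returns [("", [""])]
import Mathlib
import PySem

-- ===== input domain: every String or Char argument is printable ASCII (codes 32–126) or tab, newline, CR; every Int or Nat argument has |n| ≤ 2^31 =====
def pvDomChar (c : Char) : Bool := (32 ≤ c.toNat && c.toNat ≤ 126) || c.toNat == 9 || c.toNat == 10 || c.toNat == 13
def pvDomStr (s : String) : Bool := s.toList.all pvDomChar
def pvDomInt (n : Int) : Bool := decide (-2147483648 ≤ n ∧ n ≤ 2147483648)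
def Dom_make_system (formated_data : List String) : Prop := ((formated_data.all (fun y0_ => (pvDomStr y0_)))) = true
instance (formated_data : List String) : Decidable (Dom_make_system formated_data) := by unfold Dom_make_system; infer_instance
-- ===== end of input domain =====

-- B replaces A's per-"ls" forward rescans with a single right-to-left pass that maintains the
-- current content block; on a first-line "ls" A's key comes from negative-index wraparound (see D_).


-- ===== PORT A =====
-- inner loop 'for command_2 in range(command+1, len): if fd[command_2][0] == "$": break else append'
-- (fuel = number of remaining indices, so the recursion is structural)
def collectAGo (fd : List String) (j : Int) : Nat → List String
  | 0 => []
  | fuel + 1 =>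
    let l := (PySem.List.pyGet? fd j).getD ""
    if PySem.Str.pyGet? l 0 = some '$' then []
    else l :: collectAGo fd (j + 1) fuel

def collectA (fd : List String) (j : Int) : List String :=
  collectAGo fd j ((fd.length : Int) - j).toNat

def make_system (formated_data : List String) : List (String × List String) :=
  ((PySem.List.pyRange 0 (formated_data.length : Int) 1).foldl
    (fun dict command =>
      let expression := (PySem.List.pyGet? formated_data command).getD ""
      if PySem.Str.slice expression (some 2) (some 4) = "ls" then
        dict.insert
          (PySem.Str.slice ((PySem.List.pyGet? formated_data (command - 1)).getD "") (some 5) none)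
          (collectA formated_data (command + 1))
      else dict)
    (PySem.Dict.empty : PySem.Dict String (List String))).items

-- ===== PORT B =====
-- rev_block and entries are kept reversed in Source B (O(1) appends); rev_block[::-1] is .reverse
def stepB (st : List (String × List String) × Option (List String) × List String)
    (line : String) : List (String × List String) × Option (List String) × List String :=
  let entries := match st.2.1 with
    | some content => st.1 ++ [(PySem.Str.slice line (some 5) none, content)]
    | none => st.1
  let pending := if PySem.Str.slice line (some 2) (some 4) = "ls" then some st.2.2.reverse else none
  let rev_block := if PySem.Str.startswith line "$" then [] else st.2.2 ++ [line]
  (entries, pending, rev_block)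

def make_system_alt (formated_data : List String) : List (String × List String) :=
  let st := formated_data.reverse.foldl stepB ([], none, [])
  let system : PySem.Dict String (List String) :=
    match st.2.1 with
    | some content => (PySem.Dict.empty : PySem.Dict String (List String)).insert "" content
    | none => PySem.Dict.empty
  (st.1.reverse.foldl (fun d kv => d.insert kv.1 kv.2) system).items

-- ===== PRECONDITION & SPEC =====
-- Pre_ excludes exactly the inputs on which A raises IndexError: an empty line reached by the
-- forward scan of some "ls" line (no "$"-starting line strictly in between).
def Pre_make_system (formated_data : List String) : Prop :=
  ∀ j, j < formated_data.length →
    (∃ i, i < j ∧ PySem.Str.slice (formated_data.getD i "") (some 2) (some 4) = "ls" ∧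
      ∀ k, k < j → i < k → PySem.Str.startswith (formated_data.getD k "") "$" = false) →
    formated_data.getD j "" ≠ ""
instance (formated_data : List String) : Decidable (Pre_make_system formated_data) := by
  unfold Pre_make_system; infer_instance

def pvWitness_make_system : List String := ["$ cd /", "$ ls", "dir a", "123 b.txt"]

-- On inputs containing an empty line reached by an "ls" scan, A raises IndexError; B returns the
-- dictionary with the empty line collected as ordinary content.
def Raises_make_system (formated_data : List String) : Prop :=
  ∃ j, j < formated_data.length ∧ formated_data.getD j "" = "" ∧
    ∃ i, i < j ∧ PySem.Str.slice (formated_data.getD i "") (some 2) (some 4) = "ls" ∧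
      ∀ k, k < j → i < k → PySem.Str.startswith (formated_data.getD k "") "$" = false
instance (formated_data : List String) : Decidable (Raises_make_system formated_data) := by
  unfold Raises_make_system; infer_instance
def pvRaiseWitness_make_system : List String := ["$ ls", ""]
def pvRaiseWitnessOut_make_system : List (String × List String) := [("", [""])]

-- On inputs whose FIRST line is an "ls" command (and whose last line is longer than 5 characters),
-- A keys that listing by formated_data[-1][5:] — Python negative-index wraparound to the LAST line,
-- an accident of 'command - 1' at command 0 — while B uses the empty name, the intended value since
-- no previous "cd" line exists.
def D_make_system (formated_data : List String) : Prop :=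
  formated_data ≠ [] ∧
  PySem.Str.slice (formated_data.getD 0 "") (some 2) (some 4) = "ls" ∧
  5 < PySem.Str.len (formated_data.getLast?.getD "")
instance (formated_data : List String) : Decidable (D_make_system formated_data) := by
  unfold D_make_system; infer_instance

def Spec_make_system (formated_data : List String) (out : List (String × List String)) : Prop :=
  ¬ D_make_system formated_data → out = make_system_alt formated_data
instance (formated_data : List String) (out : List (String × List String)) : Decidable (Spec_make_system formated_data out) := by unfold Spec_make_system; infer_instance

def pvDiffWitness_make_system : List String := ["$ ls", "abcdefgh"]
def pvDiffWitnessOut_make_system : (List (String × List String)) × (List (String × List String)) :=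
  ([("fgh", ["abcdefgh"])], [("", ["abcdefgh"])])

-- ===== CLAIM (what is proved, stated in full; the proofs are below) =====
def Claim_unchanged_make_system : Prop := ∀ (formated_data : List String), Dom_make_system formated_data → Pre_make_system formated_data → Spec_make_system formated_data (make_system formated_data)
def Claim_changed_make_system : Prop := Dom_make_system (pvDiffWitness_make_system) ∧ Pre_make_system (pvDiffWitness_make_system) ∧ D_make_system (pvDiffWitness_make_system) ∧ make_system (pvDiffWitness_make_system) = pvDiffWitnessOut_make_system.1 ∧ make_system_alt (pvDiffWitness_make_system) = pvDiffWitnessOut_make_system.2 ∧ pvDiffWitnessOut_make_system.1 ≠ pvDiffWitnessOut_make_system.2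
def Claim_exact_make_system : Prop := ∀ (formated_data : List String), Dom_make_system formated_data → Pre_make_system formated_data → D_make_system formated_data → make_system formated_data ≠ make_system_alt formated_data
def Claim_raises_make_system : Prop := (∀ (formated_data : List String), Dom_make_system formated_data → Raises_make_system formated_data → ¬ Pre_make_system formated_data) ∧ (Dom_make_system (pvRaiseWitness_make_system) ∧ Raises_make_system (pvRaiseWitness_make_system) ∧ make_system_alt (pvRaiseWitness_make_system) = pvRaiseWitnessOut_make_system)

-- ===== LEMMAS AND PROOFS =====

-- spec-level vocabulary: the list of (key, content) entries both programs insert, in order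
def pvNotDollar (l : String) : Bool := !(PySem.Str.startswith l "$")
def pvKeyOf : Option String → String
  | none => ""
  | some q => PySem.Str.slice q (some 5) none
def pvE : List String → Option String → List (String × List String)
  | [], _ => []
  | l :: s, prev =>
      (if PySem.Str.slice l (some 2) (some 4) = "ls" then [(pvKeyOf prev, s.takeWhile pvNotDollar)] else []) ++ pvE s (some l)
def pvPnd : List String → Option (List String)
  | [] => none
  | l :: t => if PySem.Str.slice l (some 2) (some 4) = "ls" then some (t.takeWhile pvNotDollar) else none
def pvEtail : List String → List (String × List String)
  | [] => []
  | l :: t => pvE t (some l)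
def pvDF (d : PySem.Dict String (List String)) (es : List (String × List String)) :
    PySem.Dict String (List String) :=
  es.foldl (fun d kv => d.insert kv.1 kv.2) d

theorem pv_dollar_iff (l : String) :
    (PySem.Str.pyGet? l 0 = some '$') ↔ PySem.Str.startswith l "$" = true := by
  simp only [PySem.Str.pyGet?_eq, PySem.Str.startswith_eq, PySem.Chars.pyGet?_eq_listPyGet?]
  cases h : l.toList with
  | nil => simp [PySem.List.pyGet?, PySem.List.pyIdx?, PySem.Chars.startswith]
  | cons c cs =>
    simp [PySem.List.pyGet?, PySem.List.pyIdx?, PySem.Chars.startswith]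
    exact eq_comm

theorem pv_collectAGo (fd : List String) (n : Nat) : ∀ (j : Nat), fd.length - j = n →
    collectAGo fd (j : Int) n = (fd.drop j).takeWhile pvNotDollar := by
  induction n with
  | zero =>
    intro j hj
    have : fd.length ≤ j := by omega
    simp [collectAGo, List.drop_eq_nil_of_le this]
  | succ n ih =>
    intro j hj
    have hjl : j < fd.length := by omega
    have hget : (PySem.List.pyGet? fd (j : Int)).getD "" = fd[j] := by
      simp [PySem.List.pyGet?_natCast, List.getElem?_eq_getElem hjl]
    rw [List.drop_eq_getElem_cons hjl]
    simp only [collectAGo, hget, List.takeWhile_cons]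
    by_cases hd : PySem.Str.pyGet? fd[j] 0 = some '$'
    · have : pvNotDollar fd[j] = false := by
        unfold pvNotDollar; rw [(pv_dollar_iff _).mp hd]; rfl
      rw [if_pos hd]; simp [this]
    · have hs : PySem.Str.startswith fd[j] "$" = false := by
        rcases Bool.eq_false_or_eq_true (PySem.Str.startswith fd[j] "$") with h | h
        · exact absurd ((pv_dollar_iff _).mpr h) hd
        · exact h
      have : pvNotDollar fd[j] = true := by unfold pvNotDollar; rw [hs]; rfl
      have hcast : (j : Int) + 1 = ((j + 1 : Nat) : Int) := by omega
      simp only [hd, if_false, this, if_true]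
      rw [hcast, ih (j+1) (by omega)]

theorem pv_collectA (fd : List String) (j : Nat) :
    collectA fd (j : Int) = (fd.drop j).takeWhile pvNotDollar := by
  unfold collectA
  have h : ((fd.length : Int) - (j:Int)).toNat = fd.length - j := by omega
  rw [h, pv_collectAGo fd (fd.length - j) j rfl]

theorem pv_Amain (fd : List String) (n : Nat) : ∀ (j : Nat) (d : PySem.Dict String (List String)),
    fd.length - j = n → 1 ≤ j →
    (PySem.List.pyRange (j : Int) (fd.length : Int) 1).foldl
      (fun dict command =>
        let expression := (PySem.List.pyGet? fd command).getD ""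
        if PySem.Str.slice expression (some 2) (some 4) = "ls" then
          dict.insert
            (PySem.Str.slice ((PySem.List.pyGet? fd (command - 1)).getD "") (some 5) none)
            (collectA fd (command + 1))
        else dict) d
    = pvDF d (pvE (fd.drop j) (some (fd.getD (j - 1) ""))) := by
  induction n with
  | zero =>
    intro j d hn hj
    rw [PySem.List.pyRange_one_eq_nil (by omega), List.drop_eq_nil_of_le (by omega)]
    rfl
  | succ n ih =>
    intro j d hn hj
    have hjl : j < fd.length := by omega
    rw [PySem.List.pyRange_one_cons (by exact_mod_cast hjl), List.foldl_cons]
    have hget : (PySem.List.pyGet? fd (j : Int)).getD "" = fd[j] := by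
      simp [PySem.List.pyGet?_natCast, List.getElem?_eq_getElem hjl]
    have hprev : (PySem.List.pyGet? fd ((j : Int) - 1)).getD "" = fd.getD (j-1) "" := by
      have h : (j : Int) - 1 = ((j - 1 : Nat) : Int) := by omega
      rw [h]
      simp [PySem.List.pyGet?_natCast, List.getD]
    have hdrop : fd.drop j = fd[j] :: fd.drop (j+1) := List.drop_eq_getElem_cons hjl
    have hcast1 : (j : Int) + 1 = ((j + 1 : Nat) : Int) := by omega
    have hcoll : collectA fd ((j : Int) + 1) = (fd.drop (j+1)).takeWhile pvNotDollar := by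
      rw [hcast1, pv_collectA]
    have hgetDj : fd.getD j "" = fd[j] := by simp [List.getD, List.getElem?_eq_getElem hjl]
    simp only [hget, hcoll, hdrop, pvE]
    have pvDF_cons : ∀ d (kv : String × List String) es, pvDF d (kv :: es) = pvDF (d.insert kv.1 kv.2) es := fun _ _ _ => rfl
    by_cases hls : PySem.Str.slice fd[j] (some 2) (some 4) = "ls"
    · rw [if_pos hls, if_pos hls,
        List.singleton_append, pvDF_cons, hcast1, ih (j+1) _ (by omega) (by omega),
        Nat.add_sub_cancel, hgetDj]
      rw [show pvKeyOf (some (fd.getD (j - 1) "")) = PySem.Str.slice ((PySem.List.pyGet? fd ((j:Int) - 1)).getD "") (some 5) none from by rw [hprev]; rfl]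
    · rw [if_neg hls, if_neg hls,
        List.nil_append, hcast1, ih (j+1) _ (by omega) (by omega), Nat.add_sub_cancel, hgetDj]

theorem pv_Bmain (s : List String) :
    s.reverse.foldl stepB ([], none, []) =
      ((pvEtail s).reverse, pvPnd s, (s.takeWhile pvNotDollar).reverse) := by
  rw [List.foldl_reverse]
  induction s with
  | nil => rfl
  | cons l s ih =>
    simp only [List.foldr_cons, ih]
    unfold stepB
    refine Prod.ext ?_ (Prod.ext ?_ ?_)
    · show (match pvPnd s with
        | some content => (pvEtail s).reverse ++ [(PySem.Str.slice l (some 5) none, content)]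
        | none => (pvEtail s).reverse) = (pvEtail (l :: s)).reverse
      cases s with
      | nil => rfl
      | cons m t =>
        by_cases h : PySem.Str.slice m (some 2) (some 4) = "ls"
        · simp [pvPnd, pvEtail, pvE, h, pvKeyOf]
        · simp [pvPnd, pvEtail, pvE, h]
    · show (if PySem.Str.slice l (some 2) (some 4) = "ls" then some (s.takeWhile pvNotDollar).reverse.reverse else none) = pvPnd (l :: s)
      rw [List.reverse_reverse]
      rfl
    · show (if PySem.Str.startswith l "$" then [] else (s.takeWhile pvNotDollar).reverse ++ [l]) = ((l :: s).takeWhile pvNotDollar).reverse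
      rw [List.takeWhile_cons]
      unfold pvNotDollar
      cases hh : PySem.Str.startswith l "$" <;> simp_all

theorem pv_slice5 (q : String) : (PySem.Str.slice q (some 5) none).toList = q.toList.drop 5 := by
  rw [PySem.Str.toList_slice]
  simp only [PySem.Chars.slice_eq_listSlice]
  rw [show (5:Int) = ((5:Nat):Int) from rfl, PySem.List.slice_from_natCast]

theorem pv_slice5_empty (q : String) (h : PySem.Str.len q ≤ 5) :
    PySem.Str.slice q (some 5) none = "" := by
  apply String.toList_eq_nil_iff.mp
  rw [pv_slice5]
  rw [PySem.Str.len_eq] at h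
  exact List.drop_eq_nil_of_le (by exact_mod_cast h)

theorem pv_slice5_ne_empty (q : String) (h : 5 < PySem.Str.len q) :
    PySem.Str.slice q (some 5) none ≠ "" := by
  intro hc
  have h2 := congrArg String.toList hc
  rw [pv_slice5] at h2
  simp at h2
  rw [PySem.Str.len_eq] at h
  have hl : q.toList.length = q.length := String.length_toList
  omega

-- B rewritten through the spec vocabulary
theorem pv_alt_eq (fd : List String) :
    make_system_alt fd =
      (pvDF (match pvPnd fd with
        | some content => (PySem.Dict.empty : PySem.Dict String (List String)).insert "" content
        | none => PySem.Dict.empty) (pvEtail fd)).items := by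
  unfold make_system_alt
  rw [pv_Bmain]
  simp only [List.reverse_reverse]
  rfl

theorem pv_main (fd : List String) (hnD : ¬ D_make_system fd) :
    make_system fd = make_system_alt fd := by
  rw [pv_alt_eq]
  cases fd with
  | nil => rfl
  | cons l s =>
    unfold make_system
    have hlen : (0:Int) < ((l :: s).length : Int) := by simp
    rw [PySem.List.pyRange_one_cons hlen, List.foldl_cons]
    have hget0 : (PySem.List.pyGet? (l :: s) 0).getD "" = l := by simp [pysem]
    have hm1 : (PySem.List.pyGet? (l :: s) (0 - 1)).getD "" = (l :: s).getLast?.getD "" := by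
      rw [show (0:Int) - 1 = -1 from rfl, PySem.List.pyGet?_neg_one]
    have hc1 : collectA (l :: s) (0 + 1) = s.takeWhile pvNotDollar := by
      rw [show (0:Int) + 1 = ((1:Nat):Int) from rfl, pv_collectA]; rfl
    have hrest := fun d => pv_Amain (l :: s) ((l::s).length - 1) 1 d rfl (le_refl 1)
    simp only [hget0, hm1, hc1]
    by_cases hls : PySem.Str.slice l (some 2) (some 4) = "ls"
    · rw [if_pos hls]
      have hkey : PySem.Str.slice ((l :: s).getLast?.getD "") (some 5) none = "" := by
        apply pv_slice5_empty
        by_contra hlt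
        exact hnD ⟨by simp, hls, by omega⟩
      rw [hkey, show (0:Int) + 1 = ((1:Nat):Int) from rfl, hrest _]
      simp only [pvPnd, pvEtail, if_pos hls]
      rfl
    · rw [if_neg hls,
        show (0:Int) + 1 = ((1:Nat):Int) from rfl, hrest _]
      simp only [pvPnd, pvEtail, if_neg hls]
      rfl

theorem pv_headkey (es : List (String × List String)) :
    ∀ (d : PySem.Dict String (List String)) k v rest, d.items = (k, v) :: rest →
    ∃ v' rest', (pvDF d es).items = (k, v') :: rest' := by
  induction es with
  | nil => intro d k v rest h; exact ⟨v, rest, h⟩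
  | cons kv es ih =>
    intro d k v rest h
    have hstep : ∃ v' rest', (d.insert kv.1 kv.2).items = (k, v') :: rest' := by
      rw [PySem.Dict.items_insert]
      by_cases hc : d.contains kv.1 = true
      · rw [if_pos hc, h]
        simp only [List.map_cons]
        by_cases he : (k == kv.1) = true
        · have hk : k = kv.1 := by simpa using he
          refine ⟨kv.2, rest.map (fun p => if p.1 == kv.1 then (kv.1, kv.2) else p), ?_⟩
          simp [← hk]
        · refine ⟨v, rest.map (fun p => if p.1 == kv.1 then (kv.1, kv.2) else p), ?_⟩
          simp [he]
      · rw [if_neg hc, h]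
        exact ⟨v, rest ++ [kv], rfl⟩
    obtain ⟨v', rest', h'⟩ := hstep
    exact ih _ k v' rest' h'

theorem pv_insert_empty_items (k : String) (v : List String) :
    ((PySem.Dict.empty : PySem.Dict String (List String)).insert k v).items = [(k, v)] := by
  rw [PySem.Dict.items_insert]
  simp [PySem.Dict.contains_empty]
  rfl

theorem pv_tight (fd : List String) (hD : D_make_system fd) :
    make_system fd ≠ make_system_alt fd := by
  obtain ⟨hne, hls0, hlen⟩ := hD
  cases fd with
  | nil => exact absurd rfl hne
  | cons l s =>
    have hls : PySem.Str.slice l (some 2) (some 4) = "ls" := hls0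
    unfold make_system
    have hlenpos : (0:Int) < ((l :: s).length : Int) := by simp
    rw [PySem.List.pyRange_one_cons hlenpos, List.foldl_cons]
    have hget0 : (PySem.List.pyGet? (l :: s) 0).getD "" = l := by simp [pysem]
    have hm1 : (PySem.List.pyGet? (l :: s) (0 - 1)).getD "" = (l :: s).getLast?.getD "" := by
      rw [show (0:Int) - 1 = -1 from rfl, PySem.List.pyGet?_neg_one]
    have hc1 : collectA (l :: s) (0 + 1) = s.takeWhile pvNotDollar := by
      rw [show (0:Int) + 1 = ((1:Nat):Int) from rfl, pv_collectA]; rfl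
    have hrest := fun d => pv_Amain (l :: s) ((l::s).length - 1) 1 d rfl (le_refl 1)
    simp only [hget0, hm1, hc1]
    rw [if_pos hls,
      show (0:Int) + 1 = ((1:Nat):Int) from rfl, hrest _]
    rw [pv_alt_eq]
    simp only [pvPnd, pvEtail, if_pos hls]
    set kA := PySem.Str.slice ((l :: s).getLast?.getD "") (some 5) none with hkA
    have hkAne : kA ≠ "" := pv_slice5_ne_empty _ hlen
    intro heq
    obtain ⟨vA, rA, hA⟩ := pv_headkey (pvE (List.drop 1 (l :: s)) (some ((l :: s).getD (1-1) "")))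
      _ kA (s.takeWhile pvNotDollar) [] (pv_insert_empty_items _ _)
    obtain ⟨vB, rB, hB⟩ := pv_headkey (pvE s (some l))
      _ "" (s.takeWhile pvNotDollar) [] (pv_insert_empty_items _ _)
    rw [hA, hB] at heq
    have hcontr : kA = "" := by
      have hhead := List.head_eq_of_cons_eq heq
      exact congrArg Prod.fst hhead
    exact hkAne hcontr

-- ===== VERDICT (by name: the statement is the Claim_ definition above) =====
theorem make_system_spec : Claim_unchanged_make_system := by
  intro fd _ _ hnD
  exact pv_main fd hnD

theorem make_system_changed : Claim_changed_make_system := by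
  unfold Claim_changed_make_system; decide

theorem make_system_tight : Claim_exact_make_system := by
  intro fd _ _ hD
  exact pv_tight fd hD

@[simp] theorem make_system_raises : Claim_raises_make_system := by
  unfold Claim_raises_make_system
  exact ⟨fun fd _ hR hPre => by
      obtain ⟨j, hj, hemp, i, hij, hls, hk⟩ := hR
      exact hPre j hj ⟨i, hij, hls, hk⟩ hemp,
    by decide⟩
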